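-- pv_equiv track=rewrite | github.com/ivansbob/1solana-coin-signal-engine | collectors/bundle_evidence_collector.py | _classify_composition
-- ===== SOURCE A (Python) =====
-- from typing import Any
--
-- def _classify_composition(records: list[dict[str, Any]]) -> str:
--     buys = sum(1 for record in records if record.get("side") == "buy")
--     sells = sum(1 for record in records if record.get("side") == "sell")
--     if buys == 0 and sells == 0:
--         return "unknown"
--     if buys > 0 and sells == 0:
--         return "buy-only"
--     if sells > 0 and buys == 0:
--         return "sell-only"
--     return "mixed"
-- ===== SOURCE B (Python) =====
-- from typing import Any
--
-- def _classify_composition(records: list[dict[str, Any]]) -> str: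
--     has_buy = False
--     has_sell = False
--     for record in records:
--         side = record.get("side")
--         has_buy = has_buy or side == "buy"
--         has_sell = has_sell or side == "sell"
--         if has_buy and has_sell:
--             return "mixed"
--     if has_buy:
--         return "buy-only"
--     if has_sell:
--         return "sell-only"
--     return "unknown"
-- ===== Notes on version B (the rewrite author's own statement) =====
-- stated objective: simpler
-- what changed: Replaced the two counting comprehensions plus four-way count comparison with a single pass maintaining two presence booleans, returning 'mixed' as soon as both sides have been seen.
import Mathlib
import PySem

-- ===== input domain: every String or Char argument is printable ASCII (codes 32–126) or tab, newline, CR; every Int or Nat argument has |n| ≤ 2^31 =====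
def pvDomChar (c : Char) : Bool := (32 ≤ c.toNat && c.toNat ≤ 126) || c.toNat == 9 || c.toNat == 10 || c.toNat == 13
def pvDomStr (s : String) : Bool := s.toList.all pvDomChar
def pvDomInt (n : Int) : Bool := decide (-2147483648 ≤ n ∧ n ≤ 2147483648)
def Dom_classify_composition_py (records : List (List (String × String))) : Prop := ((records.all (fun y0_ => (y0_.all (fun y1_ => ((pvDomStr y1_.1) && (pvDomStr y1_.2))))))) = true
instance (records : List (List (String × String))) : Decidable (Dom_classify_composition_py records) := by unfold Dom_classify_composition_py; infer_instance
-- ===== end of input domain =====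

-- B replaces A's two counting passes with one pass over presence booleans (early exit on "mixed"): simpler.
-- record.get("side") on an assoc-list dict is a first-match lookup: List.lookup (exact, keys are unique in a Python dict).

-- ===== PORT A =====
def classify_composition_py (records : List (List (String × String))) : String :=
  let buys : Int := records.foldl
    (fun acc record => if List.lookup "side" record == some "buy" then acc + 1 else acc) 0
  let sells : Int := records.foldl
    (fun acc record => if List.lookup "side" record == some "sell" then acc + 1 else acc) 0
  if buys = 0 ∧ sells = 0 then "unknown"
  else if buys > 0 ∧ sells = 0 then "buy-only"
  else if sells > 0 ∧ buys = 0 then "sell-only"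
  else "mixed"

-- ===== PORT B =====
def classifyCompositionGo : List (List (String × String)) → Bool → Bool → String
  | [], has_buy, has_sell =>
      if has_buy then "buy-only"
      else if has_sell then "sell-only"
      else "unknown"
  | record :: rest, has_buy, has_sell =>
      let side := List.lookup "side" record
      let has_buy := has_buy || side == some "buy"
      let has_sell := has_sell || side == some "sell"
      if has_buy && has_sell then "mixed"
      else classifyCompositionGo rest has_buy has_sell

def classify_composition_py_alt (records : List (List (String × String))) : String :=
  classifyCompositionGo records false false

-- ===== PRECONDITION & SPEC =====
def Spec_classify_composition_py (records : List (List (String × String))) (out : String) : Prop := out = classify_composition_py_alt records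
instance (records : List (List (String × String))) (out : String) : Decidable (Spec_classify_composition_py records out) := by unfold Spec_classify_composition_py; infer_instance

-- ===== CLAIM (what is proved, stated in full; the proofs are below) =====
def Claim_equal_classify_composition_py : Prop := ∀ (records : List (List (String × String))), Dom_classify_composition_py records → Spec_classify_composition_py records (classify_composition_py records)

-- ===== LEMMAS AND PROOFS =====

def pvIsSide (s : String) (record : List (String × String)) : Bool :=
  List.lookup "side" record == some s

def pvCnt (s : String) (l : List (List (String × String))) : Int :=
  l.foldl (fun acc record => if List.lookup "side" record == some s then acc + 1 else acc) 0

def pvFinal (hb hs : Bool) : String :=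
  if hb && hs then "mixed"
  else if hb then "buy-only"
  else if hs then "sell-only"
  else "unknown"

theorem pvCnt_shift (s : String) (l : List (List (String × String))) (n : Int) :
    l.foldl (fun acc record => if List.lookup "side" record == some s then acc + 1 else acc) n
      = n + pvCnt s l := by
  induction l generalizing n with
  | nil => simp [pvCnt]
  | cons r t ih =>
      simp only [pvCnt, List.foldl_cons]
      rw [ih, ih]
      split <;> ring

theorem pvCnt_cons (s : String) (r : List (String × String)) (t : List (List (String × String))) :
    pvCnt s (r :: t) = (if List.lookup "side" r == some s then 1 else 0) + pvCnt s t := by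
  simp only [pvCnt, List.foldl_cons]
  rw [pvCnt_shift]
  split <;> simp [pvCnt]

theorem pvCnt_nonneg (s : String) (l : List (List (String × String))) : 0 ≤ pvCnt s l := by
  induction l with
  | nil => simp [pvCnt]
  | cons r t ih =>
      rw [pvCnt_cons]
      split <;> omega

theorem pvCnt_zero_iff (s : String) (l : List (List (String × String))) :
    pvCnt s l = 0 ↔ l.any (pvIsSide s) = false := by
  induction l with
  | nil => simp [pvCnt]
  | cons r t ih =>
      have h := pvCnt_nonneg s t
      rw [pvCnt_cons]
      simp only [List.any_cons, Bool.or_eq_false_iff, pvIsSide]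
      by_cases hr : (List.lookup "side" r == some s) = true
      · simp only [hr, if_true]
        constructor
        · intro h0; exact absurd h0 (by omega)
        · rintro ⟨h1, _⟩; simp at h1
      · have hr' : (List.lookup "side" r == some s) = false := by simpa using hr
        simp [hr', ih]

theorem classifyGo_eq (l : List (List (String × String))) :
    ∀ hb hs : Bool, (hb && hs) = false → classifyCompositionGo l hb hs
      = pvFinal (hb || l.any (pvIsSide "buy")) (hs || l.any (pvIsSide "sell")) := by
  induction l with
  | nil => intro hb hs hclash; cases hb <;> cases hs <;> simp_all [classifyCompositionGo, pvFinal]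
  | cons r t ih =>
      intro hb hs hclash
      simp only [classifyCompositionGo, List.any_cons]
      by_cases hmix : ((hb || List.lookup "side" r == some "buy")
          && (hs || List.lookup "side" r == some "sell")) = true
      · simp only [hmix, if_true]
        simp only [Bool.and_eq_true, Bool.or_eq_true] at hmix
        unfold pvFinal
        have hb' : (hb || (pvIsSide "buy" r || t.any (pvIsSide "buy"))) = true := by
          rcases hmix.1 with h | h <;> simp [pvIsSide, h]
        have hs' : (hs || (pvIsSide "sell" r || t.any (pvIsSide "sell"))) = true := by
          rcases hmix.2 with h | h <;> simp [pvIsSide, h]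
        simp [hb', hs']
      · simp only [hmix]
        rw [ih _ _ (by simpa using hmix)]
        simp [pvIsSide, Bool.or_assoc]

theorem classify_composition_py_eq (records : List (List (String × String))) :
    classify_composition_py records = classify_composition_py_alt records := by
  unfold classify_composition_py classify_composition_py_alt
  rw [classifyGo_eq records false false rfl]
  simp only [Bool.false_or]
  show (if pvCnt "buy" records = 0 ∧ pvCnt "sell" records = 0 then "unknown"
    else if pvCnt "buy" records > 0 ∧ pvCnt "sell" records = 0 then "buy-only"
    else if pvCnt "sell" records > 0 ∧ pvCnt "buy" records = 0 then "sell-only"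
    else "mixed") = _
  have hbn := pvCnt_nonneg "buy" records
  have hsn := pvCnt_nonneg "sell" records
  cases hB : records.any (pvIsSide "buy") <;> cases hS : records.any (pvIsSide "sell")
  · have hb0 := (pvCnt_zero_iff "buy" records).mpr hB
    have hs0 := (pvCnt_zero_iff "sell" records).mpr hS
    have hv : pvFinal false false = "unknown" := rfl
    rw [hv]
    split_ifs <;> first | rfl | omega
  · have hb0 := (pvCnt_zero_iff "buy" records).mpr hB
    have hsp : pvCnt "sell" records ≠ 0 := fun h => by
      rw [(pvCnt_zero_iff "sell" records).mp h] at hS; cases hS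
    have hv : pvFinal false true = "sell-only" := rfl
    rw [hv]
    split_ifs <;> first | rfl | omega
  · have hs0 := (pvCnt_zero_iff "sell" records).mpr hS
    have hbp : pvCnt "buy" records ≠ 0 := fun h => by
      rw [(pvCnt_zero_iff "buy" records).mp h] at hB; cases hB
    have hv : pvFinal true false = "buy-only" := rfl
    rw [hv]
    split_ifs <;> first | rfl | omega
  · have hsp : pvCnt "sell" records ≠ 0 := fun h => by
      rw [(pvCnt_zero_iff "sell" records).mp h] at hS; cases hS
    have hbp : pvCnt "buy" records ≠ 0 := fun h => by
      rw [(pvCnt_zero_iff "buy" records).mp h] at hB; cases hB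
    have hv : pvFinal true true = "mixed" := rfl
    rw [hv]
    split_ifs <;> first | rfl | omega

-- ===== VERDICT (by name: the statement is the Claim_ definition above) =====
theorem classify_composition_py_spec : Claim_equal_classify_composition_py := by
  intro records _
  exact classify_composition_py_eq records
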